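-- pv_equiv track=rewrite | github.com/yamana819/COM1001 | labsolutions/lab5g1.py | increasing_subseq
-- ===== SOURCE A (Python) =====
-- def increasing_subseq(list1):
--     sublists=[]
--     temp=[list1[0]]
--     for i in range(1,len(list1)):
--         if list1[i]>list1[i-1]:
--             temp.append(list1[i])
--         else:
--             if len(temp)>1:
--                 sublists.append(temp)
--             temp=[list1[i]]
--     if len(temp)>1:
--         sublists.append(temp)
--     return sublists
-- ===== SOURCE B (Python) =====
-- # Boundary-pair decomposition: compute cut points once, then slice; returns [] on empty where A raises IndexError.
-- def increasing_subseq(list1):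
--     n = len(list1)
--     bounds = [0] + [i for i in range(1, n) if list1[i] <= list1[i - 1]] + [n]
--     return [list1[a:b] for a, b in zip(bounds, bounds[1:]) if b - a > 1]
-- ===== Notes on version B (the rewrite author's own statement) =====
-- stated objective: alternative
-- what changed: B replaces A's stateful single pass carrying a growing temp run with a two-phase boundary decomposition: first collect the cut indices where the sequence fails to increase, then slice the list between consecutive boundaries and keep slices longer than 1.
import Mathlib
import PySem

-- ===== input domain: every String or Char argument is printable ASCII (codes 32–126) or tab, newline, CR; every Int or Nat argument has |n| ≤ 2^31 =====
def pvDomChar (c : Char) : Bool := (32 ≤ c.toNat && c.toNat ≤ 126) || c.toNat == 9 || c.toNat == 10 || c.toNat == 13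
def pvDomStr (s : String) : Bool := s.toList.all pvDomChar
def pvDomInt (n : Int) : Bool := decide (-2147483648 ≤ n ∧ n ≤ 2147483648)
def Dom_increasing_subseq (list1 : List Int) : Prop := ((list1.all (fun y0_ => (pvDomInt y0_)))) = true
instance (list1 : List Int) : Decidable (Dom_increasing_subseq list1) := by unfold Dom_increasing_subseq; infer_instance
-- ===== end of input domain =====

-- B re-implements the run extraction by a boundary-pair decomposition (cut indices, then slices);
-- objective: alternative decomposition, same asymptotic cost. B returns [] on the empty list where A raises.

-- ===== PORT A =====
-- literal transliteration of A: running state (sublists, temp); list1[0] raises on [] (none branch, excluded by Pre_);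
-- the in-loop indices i, i-1 are always in range, so pyGetD with default 0 is exact there.
def increasing_subseq (list1 : List Int) : List (List Int) :=
  match PySem.List.pyGet? list1 0 with
  | none => []   -- Python raises IndexError here; outside Pre_
  | some h0 =>
    let st := (PySem.List.pyRange 1 (list1.length : Int) 1).foldl
      (fun (st : List (List Int) × List Int) i =>
        let xi := PySem.List.pyGetD list1 i 0
        let xim := PySem.List.pyGetD list1 (i - 1) 0
        if xim < xi then (st.1, st.2 ++ [xi])
        else if st.2.length > 1 then (st.1 ++ [st.2], [xi]) else (st.1, [xi]))
      ([], [h0])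
    if st.2.length > 1 then st.1 ++ [st.2] else st.1

-- ===== PORT B =====
-- literal transliteration of Source B: boundary list, then slices of the consecutive boundary pairs
def increasing_subseq_alt (list1 : List Int) : List (List Int) :=
  let n : Int := (list1.length : Int)
  let bounds : List Int :=
    [0] ++ (PySem.List.pyRange 1 n 1).filter
      (fun i => PySem.List.pyGetD list1 i 0 ≤ PySem.List.pyGetD list1 (i - 1) 0) ++ [n]
  ((bounds.zip bounds.tail).filter (fun p => 1 < p.2 - p.1)).map
    (fun p => PySem.List.slice list1 (some p.1) (some p.2))

-- ===== PRECONDITION & SPEC =====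
-- Pre_ excludes only the empty list, on which A raises IndexError (temp=[list1[0]]).
def Pre_increasing_subseq (list1 : List Int) : Prop := list1 ≠ []
instance (list1 : List Int) : Decidable (Pre_increasing_subseq list1) := by
  unfold Pre_increasing_subseq; infer_instance
def pvWitness_increasing_subseq : List Int := ([1, 2, 1])

def Spec_increasing_subseq (list1 : List Int) (out : List (List Int)) : Prop :=
  out = increasing_subseq_alt list1
instance (list1 : List Int) (out : List (List Int)) : Decidable (Spec_increasing_subseq list1 out) := by
  unfold Spec_increasing_subseq; infer_instance

-- ===== CLAIM (what is proved, stated in full; the proofs are below) =====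
def Claim_equal_increasing_subseq : Prop := ∀ (list1 : List Int), Dom_increasing_subseq list1 → Pre_increasing_subseq list1 → Spec_increasing_subseq list1 (increasing_subseq list1)

-- ===== LEMMAS AND PROOFS =====

-- the cut indices among 1..b-1 (exactly the filter in port B) and the segments between boundaries
def cutsI (l : List Int) (b : Int) : List Int :=
  (PySem.List.pyRange 1 b 1).filter
    (fun i => PySem.List.pyGetD l i 0 ≤ PySem.List.pyGetD l (i - 1) 0)

def segsI (l : List Int) (bs : List Int) : List (List Int) :=
  ((bs.zip bs.tail).filter (fun p => 1 < p.2 - p.1)).map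
    (fun p => PySem.List.slice l (some p.1) (some p.2))

lemma alt_eq (l : List Int) :
    increasing_subseq_alt l = segsI l (0 :: cutsI l (l.length : Int) ++ [(l.length : Int)]) := by
  rfl

lemma zip_tail_append {α : Type} (bs : List α) (hbs : bs ≠ []) (k : α) :
    (bs ++ [k]).zip (bs ++ [k]).tail = bs.zip bs.tail ++ [(bs.getLast hbs, k)] := by
  induction bs with
  | nil => simp at hbs
  | cons a t ih =>
    cases t with
    | nil => simp
    | cons b t' =>
      have := ih (by simp)
      simp only [List.cons_append, List.tail_cons, List.zip_cons_cons] at this ⊢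
      rw [this]
      simp [List.getLast]

lemma segsI_append (l : List Int) (bs : List Int) (hbs : bs ≠ []) (k : Int) :
    segsI l (bs ++ [k]) =
      segsI l bs ++
        (if 1 < k - bs.getLast hbs then
          [PySem.List.slice l (some (bs.getLast hbs)) (some k)] else []) := by
  unfold segsI
  rw [zip_tail_append bs hbs k, List.filter_append, List.map_append]
  congr 1
  by_cases h : 1 < k - bs.getLast hbs <;> simp [h]

lemma segsI_snoc (l : List Int) (xs : List Int) (k : Int) :
    segsI l (0 :: (xs ++ [k])) =
      segsI l (0 :: xs) ++
        (if 1 < k - (0 :: xs).getLast (by simp) then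
          [PySem.List.slice l (some ((0 :: xs).getLast (by simp))) (some k)] else []) := by
  have h := segsI_append l (0 :: xs) (by simp) k
  simpa using h

lemma cutsI_succ (l : List Int) (m : Nat) (hm : 1 ≤ m) :
    cutsI l ((m : Int) + 1) =
      cutsI l (m : Int) ++
        (if PySem.List.pyGetD l (m : Int) 0 ≤ PySem.List.pyGetD l ((m : Int) - 1) 0
         then [(m : Int)] else []) := by
  unfold cutsI
  rw [PySem.List.pyRange_one_succ_right (by exact_mod_cast hm), List.filter_append]
  congr 1
  by_cases h : PySem.List.pyGetD l (m : Int) 0 ≤ PySem.List.pyGetD l ((m : Int) - 1) 0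
  · have hd := decide_eq_true h
    simp only [List.filter_singleton, hd, if_pos h]
    simp
  · have hd := decide_eq_false h
    simp only [List.filter_singleton, hd, if_neg h]
    simp

lemma cutsI_mem (l : List Int) (b : Int) : ∀ c ∈ cutsI l b, 1 ≤ c ∧ c < b := by
  intro c hc
  unfold cutsI at hc
  have := List.mem_of_mem_filter hc
  exact (PySem.List.mem_pyRange_one).mp this

lemma getLast_bounds (l : List Int) (b : Int) (hb : 1 ≤ b) :
    0 ≤ (0 :: cutsI l b).getLast (by simp) ∧ (0 :: cutsI l b).getLast (by simp) < b := by
  have hmem := List.getLast_mem (show (0 :: cutsI l b) ≠ [] by simp)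
  rcases List.mem_cons.mp hmem with h | h
  · constructor <;> omega
  · have := cutsI_mem l b _ h
    constructor <;> omega

lemma slice_one (l : List Int) (m : Nat) (hm : m < l.length) :
    PySem.List.slice l (some (m : Int)) (some ((m : Int) + 1)) = [l.getD m 0] := by
  have : (m : Int) + 1 = ((m + 1 : Nat) : Int) := by push_cast; ring
  rw [this, PySem.List.slice_natCast]
  have h1 : m + 1 - m = 0 + 1 := by omega
  rw [h1, List.take_add_one]
  simp [List.getElem?_drop, List.getD_eq_getElem?_getD, List.getElem?_eq_getElem hm]

lemma slice_ext (l : List Int) (c : Int) (m : Nat) (h0 : 0 ≤ c) (hc : c ≤ (m : Int))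
    (hm : m < l.length) :
    PySem.List.slice l (some c) (some ((m : Int) + 1)) =
      PySem.List.slice l (some c) (some (m : Int)) ++ [l.getD m 0] := by
  obtain ⟨cn, rfl⟩ : ∃ cn : Nat, c = (cn : Int) := ⟨c.toNat, by omega⟩
  have hcm : cn ≤ m := by exact_mod_cast hc
  have : (m : Int) + 1 = ((m + 1 : Nat) : Int) := by push_cast; ring
  rw [this, PySem.List.slice_natCast, PySem.List.slice_natCast]
  have h1 : m + 1 - cn = (m - cn) + 1 := by omega
  rw [h1, List.take_add_one]
  have h2 : cn + (m - cn) = m := by omega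
  simp [List.getElem?_drop, h2, List.getD_eq_getElem?_getD, List.getElem?_eq_getElem hm]

lemma length_slice' (l : List Int) (c : Int) (m : Nat) (h0 : 0 ≤ c) (hc : c ≤ (m : Int))
    (hm : m ≤ l.length) :
    ((PySem.List.slice l (some c) (some (m : Int))).length : Int) = (m : Int) - c := by
  obtain ⟨cn, rfl⟩ : ∃ cn : Nat, c = (cn : Int) := ⟨c.toNat, by omega⟩
  have hcm : cn ≤ m := by exact_mod_cast hc
  rw [PySem.List.slice_natCast]
  simp [List.length_take, List.length_drop]
  omega

-- the loop invariant of A's fold: state = (closed segments so far, current open run as a slice)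
lemma fold_inv (l : List Int) (m : Nat) (h1 : 1 ≤ m) (hm : m ≤ l.length) :
    (PySem.List.pyRange 1 (m : Int) 1).foldl
      (fun (st : List (List Int) × List Int) i =>
        let xi := PySem.List.pyGetD l i 0
        let xim := PySem.List.pyGetD l (i - 1) 0
        if xim < xi then (st.1, st.2 ++ [xi])
        else if st.2.length > 1 then (st.1 ++ [st.2], [xi]) else (st.1, [xi]))
      ([], [l.getD 0 0])
    = (segsI l (0 :: cutsI l (m : Int)),
       PySem.List.slice l (some ((0 :: cutsI l (m : Int)).getLast (by simp))) (some (m : Int))) := by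
  induction m, h1 using Nat.le_induction with
  | base =>
    have h0 : 0 < l.length := by omega
    have e1 : PySem.List.pyRange 1 ((1 : Nat) : Int) 1 = [] := by
      simp
    have e2 : cutsI l ((1 : Nat) : Int) = [] := by
      unfold cutsI; rw [e1]; rfl
    rw [e1, e2]
    simp only [List.foldl_nil, Prod.mk.injEq]
    refine ⟨rfl, ?_⟩
    rw [show (((0 : Int) :: ([] : List Int)).getLast (by simp)) = ((0 : Nat) : Int) by simp,
      show ((1 : Nat) : Int) = ((0 : Nat) : Int) + 1 by simp]
    rw [slice_one l 0 h0]
  | succ m hm1 ih =>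
    have hmlt : m < l.length := by omega
    have ih' := ih (by omega)
    have hcast : ((m + 1 : Nat) : Int) = (m : Int) + 1 := by push_cast; ring
    rw [hcast, PySem.List.pyRange_one_succ_right (by exact_mod_cast hm1), List.foldl_append,
      ih', List.foldl_cons, List.foldl_nil]
    have hxi : PySem.List.pyGetD l (m : Int) 0 = l.getD m 0 := PySem.List.pyGetD_natCast l m 0
    have hxim : PySem.List.pyGetD l ((m : Int) - 1) 0 = l.getD (m - 1) 0 := by
      rw [show ((m : Int) - 1) = ((m - 1 : Nat) : Int) by omega, PySem.List.pyGetD_natCast]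
    set c := (0 :: cutsI l (m : Int)).getLast (by simp) with hc
    obtain ⟨hc0, hcm⟩ := getLast_bounds l (m : Int) (by exact_mod_cast hm1)
    rw [← hc] at hc0 hcm
    rw [cutsI_succ l m hm1]
    by_cases h : PySem.List.pyGetD l ((m : Int) - 1) 0 < PySem.List.pyGetD l (m : Int) 0
    · -- run continues: no new cut
      rw [if_pos h]
      have hnocut : ¬ (PySem.List.pyGetD l (m : Int) 0 ≤ PySem.List.pyGetD l ((m : Int) - 1) 0) := by omega
      rw [if_neg hnocut, List.append_nil]
      refine Prod.ext rfl ?_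
      simp only []
      rw [hxi, slice_ext l c m hc0 (by omega) hmlt]
    · -- run ends at m: new cut
      simp only [h, if_false]
      have hcut : PySem.List.pyGetD l (m : Int) 0 ≤ PySem.List.pyGetD l ((m : Int) - 1) 0 := by omega
      rw [if_pos hcut]
      rw [segsI_snoc l _ (m : Int), ← hc]
      have hlast : ((0 : Int) :: (cutsI l (m : Int) ++ [(m : Int)])).getLast (by simp) = (m : Int) := by
        simp
      rw [hlast]
      have hlen : ((PySem.List.slice l (some c) (some (m : Int))).length : Int) = (m : Int) - c :=
        length_slice' l c m hc0 (by omega) (by omega)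
      by_cases hlong : 1 < (m : Int) - c
      · have hl2 : ((PySem.List.slice l (some c) (some (m : Int))).length > 1) := by omega
        rw [if_pos hl2, if_pos hlong, hxi, slice_one l m hmlt]
      · have hl2 : ¬ ((PySem.List.slice l (some c) (some (m : Int))).length > 1) := by omega
        rw [if_neg hl2, if_neg hlong, List.append_nil, hxi, slice_one l m hmlt]

-- ===== VERDICT (by name: the statement is the Claim_ definition above) =====
theorem increasing_subseq_spec : Claim_equal_increasing_subseq := by
  intro l _ hpre
  unfold Spec_increasing_subseq
  obtain ⟨x, t, rfl⟩ : ∃ x t, l = x :: t := by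
    cases l with
    | nil => exact absurd rfl hpre
    | cons x t => exact ⟨x, t, rfl⟩
  set l := x :: t with hl
  have hlen : 1 ≤ l.length := by simp [hl]
  have hget : PySem.List.pyGet? l 0 = some (l.getD 0 0) := by
    rw [show (0 : Int) = ((0 : Nat) : Int) from rfl, PySem.List.pyGet?_natCast]
    simp [hl]
  unfold increasing_subseq
  rw [hget]
  simp only []
  rw [fold_inv l l.length hlen le_rfl, alt_eq l]
  dsimp only
  set c := (0 :: cutsI l (l.length : Int)).getLast (by simp) with hc
  obtain ⟨hc0, hcm⟩ := getLast_bounds l (l.length : Int) (by exact_mod_cast hlen)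
  rw [← hc] at hc0 hcm
  rw [segsI_append l (0 :: cutsI l (l.length : Int)) (by simp) (l.length : Int), ← hc]
  have hlen2 : ((PySem.List.slice l (some c) (some (l.length : Int))).length : Int)
      = (l.length : Int) - c := length_slice' l c l.length hc0 (by omega) le_rfl
  by_cases hlong : 1 < (l.length : Int) - c
  · rw [if_pos (show ((PySem.List.slice l (some c) (some (l.length : Int))).length > 1) by omega),
      if_pos hlong]
  · rw [if_neg (show ¬ ((PySem.List.slice l (some c) (some (l.length : Int))).length > 1) by omega),
      if_neg hlong, List.append_nil]
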